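-- pv_equiv track=rewrite | github.com/zhh2001/algorithm_problems | lanqiao/5127.py | is_three_and_one
-- ===== SOURCE A (Python) =====
-- def is_three_and_one(arr):
--     counter = {}
--     for n in arr:
--         counter[n] = counter.get(n, 0) + 1
--     flag = False
--     for value in counter.values():
--         if value == 3:
--             flag = True
--     return flag
-- ===== SOURCE B (Python) =====
-- def is_three_and_one(arr):
--     s = sorted(arr)
--     if not s:
--         return False
--     cur = s[0]
--     run = 1
--     for x in s[1:]:
--         if x == cur:
--             run += 1
--         else:
--             if run == 3:
--                 return True
--             cur = x
--             run = 1
--     return run == 3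
-- ===== Notes on version B (the rewrite author's own statement) =====
-- stated objective: alternative
-- what changed: B drops the frequency dictionary entirely: it sorts the list and does a single run-length scan over the sorted list, returning true as soon as a maximal run has length exactly 3.
import Mathlib
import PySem

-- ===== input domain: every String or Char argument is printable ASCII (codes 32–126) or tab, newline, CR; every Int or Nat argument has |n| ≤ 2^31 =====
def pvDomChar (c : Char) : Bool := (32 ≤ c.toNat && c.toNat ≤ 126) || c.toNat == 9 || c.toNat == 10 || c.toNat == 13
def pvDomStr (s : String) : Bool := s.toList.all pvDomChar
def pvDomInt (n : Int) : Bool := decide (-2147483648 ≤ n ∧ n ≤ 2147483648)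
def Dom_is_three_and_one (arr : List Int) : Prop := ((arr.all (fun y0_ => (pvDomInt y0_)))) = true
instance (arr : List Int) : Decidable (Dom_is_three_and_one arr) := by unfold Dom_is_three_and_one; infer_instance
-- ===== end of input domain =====

-- ===== PORT A =====
-- B sorts the list and does a single run-length scan instead of building a frequency dictionary.
def is_three_and_one (arr : List Int) : Bool :=
  let counter : PySem.Dict Int Int :=
    arr.foldl (fun d n => d.insert n (d.getD n 0 + 1)) PySem.Dict.empty
  (PySem.Dict.values counter).foldl (fun flag v => if v == 3 then true else flag) false

-- ===== PORT B =====
-- the 'for x in s[1:]' loop with early return, as structural recursion on the tail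
def runScan (cur run : Int) : List Int → Bool
  | [] => run == 3
  | x :: xs =>
    if x == cur then runScan cur (run + 1) xs
    else if run == 3 then true else runScan x 1 xs

def is_three_and_one_alt (arr : List Int) : Bool :=
  match PySem.List.sorted arr (fun x => x) false with
  | [] => false
  | x :: xs => runScan x 1 xs

-- ===== PRECONDITION & SPEC =====
def Spec_is_three_and_one (arr : List Int) (out : Bool) : Prop := out = is_three_and_one_alt arr
instance (arr : List Int) (out : Bool) : Decidable (Spec_is_three_and_one arr out) := by unfold Spec_is_three_and_one; infer_instance

-- ===== CLAIM =====
def Claim_equal_is_three_and_one : Prop := ∀ (arr : List Int), Dom_is_three_and_one arr → Spec_is_three_and_one arr (is_three_and_one arr)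

-- ===== LEMMAS AND PROOFS =====

-- run-length scan over a sorted tail: true iff the current run or some later run has length 3
lemma runScan_spec (l : List Int) (cur run : Int)
    (hs : l.Pairwise (· ≤ ·)) (hge : ∀ y ∈ l, cur ≤ y) :
    runScan cur run l
      = ((run + (l.count cur : Int) == 3) ||
         l.any (fun y => decide (cur < y) && ((l.count y : Int) == 3))) := by
  induction l generalizing cur run with
  | nil => simp [runScan]
  | cons x xs ih =>
    rcases List.pairwise_cons.mp hs with ⟨hx, hxs⟩
    have hcx : cur ≤ x := hge x (by simp)
    by_cases hxc : x = cur
    · subst hxc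
      rw [runScan, if_pos (by simp)]
      rw [ih _ _ hxs (fun y hy => le_trans hcx (hx y hy))]
      rw [Bool.eq_iff_iff]
      simp only [Bool.or_eq_true, beq_iff_eq, List.any_eq_true, List.count_cons,
        Bool.and_eq_true, decide_eq_true_eq, List.mem_cons]
      constructor
      · rintro (h | ⟨y, hy, hlt, hc⟩)
        · left; push_cast at h ⊢; omega
        · right; refine ⟨y, Or.inr hy, hlt, ?_⟩
          simp [hlt.ne, hc]
      · rintro (h | ⟨y, hy, hlt, hc⟩)
        · left; push_cast at h ⊢; omega
        · have hyne : y ≠ x := ne_of_gt hlt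
          rcases hy with rfl | hy
          · exact absurd rfl hyne
          · right
            simp only [if_neg hlt.ne, Nat.add_zero] at hc
            exact ⟨y, hy, hlt, hc⟩
    · have hlt : cur < x := lt_of_le_of_ne hcx (fun h => hxc h.symm)
      have hnotmem : (x :: xs).count cur = 0 := by
        rw [List.count_eq_zero]
        intro hmem
        rcases List.mem_cons.mp hmem with rfl | hmem
        · exact hxc rfl
        · exact absurd (hx cur hmem) (not_le.mpr hlt)
      rw [runScan, if_neg (by simp [hxc])]
      by_cases hr : run = 3
      · rw [if_pos (by simp [hr])]
        rw [hnotmem]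
        simp [hr]
      · rw [if_neg (by simpa using hr)]
        rw [ih _ _ hxs (fun y hy => hx y hy)]
        rw [Bool.eq_iff_iff]
        simp only [Bool.or_eq_true, beq_iff_eq, List.any_eq_true, Bool.and_eq_true,
          decide_eq_true_eq, List.mem_cons, hnotmem]
        constructor
        · rintro (h | ⟨y, hy, hly, hc⟩)
          · right
            refine ⟨x, Or.inl rfl, hlt, ?_⟩
            simp only [List.count_cons_self]; push_cast at h ⊢; omega
          · right
            refine ⟨y, Or.inr hy, lt_trans hlt hly, ?_⟩
            rw [List.count_cons_of_ne hly.ne]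
            exact hc
        · rintro (h | ⟨y, hy, hcy, hc⟩)
          · exact absurd h (by push_cast; omega)
          · rcases hy with rfl | hy
            · left; rw [List.count_cons_self] at hc; push_cast at hc; omega
            · by_cases hyx : y = x
              · subst hyx
                left; rw [List.count_cons_self] at hc; push_cast at hc; omega
              · right
                have hxy : x ≤ y := hx y hy
                rw [List.count_cons_of_ne (fun h => hyx h.symm)] at hc
                exact ⟨y, hy, lt_of_le_of_ne hxy (Ne.symm hyx), hc⟩

-- both programs decide '∃ x ∈ arr, arr.count x = 3'
lemma alt_iff (arr : List Int) :
    is_three_and_one_alt arr = true ↔ ∃ x ∈ arr, arr.count x = 3 := by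
  unfold is_three_and_one_alt
  rcases hsrt : PySem.List.sorted arr (fun x => x) false with _ | ⟨m, t⟩
  · have : arr = [] := by
      have := (PySem.List.sorted_eq_nil_iff (xs := arr) (key := fun x => x) (rev := false)).mp hsrt
      exact this
    simp [this]
  · have hperm : (m :: t).Perm arr := hsrt ▸ PySem.List.sorted_perm arr (fun x => x) false
    have hpair : (m :: t).Pairwise (fun a b => a ≤ b) := by
      have := PySem.List.sorted_pairwise arr (fun x => x)
      rw [hsrt] at this; exact this
    rcases List.pairwise_cons.mp hpair with ⟨hm, ht⟩
    show runScan m 1 t = true ↔ _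
    rw [runScan_spec t m 1 ht hm]
    simp only [Bool.or_eq_true, beq_iff_eq, List.any_eq_true, Bool.and_eq_true, decide_eq_true_eq]
    have hcnt : ∀ y : Int, (m :: t).count y = arr.count y := fun y => hperm.count_eq y
    constructor
    · rintro (h | ⟨y, hy, hlt, hc⟩)
      · refine ⟨m, hperm.mem_iff.mp (by simp), ?_⟩
        rw [← hcnt m, List.count_cons_self]
        push_cast at h ⊢; omega
      · refine ⟨y, hperm.mem_iff.mp (by simp [hy]), ?_⟩
        rw [← hcnt y, List.count_cons_of_ne hlt.ne]
        exact_mod_cast hc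
    · rintro ⟨x, hx, hc⟩
      have hxs : x ∈ m :: t := hperm.mem_iff.mpr hx
      rw [← hcnt x] at hc
      by_cases hxm : x = m
      · subst hxm
        left; rw [List.count_cons_self] at hc; push_cast at hc; omega
      · rcases List.mem_cons.mp hxs with rfl | hxt
        · exact absurd rfl hxm
        · right
          refine ⟨x, hxt, lt_of_le_of_ne (hm x hxt) (Ne.symm hxm), ?_⟩
          rw [List.count_cons_of_ne (Ne.symm hxm)] at hc
          exact_mod_cast hc

lemma a_iff (arr : List Int) :
    is_three_and_one arr = true ↔ ∃ x ∈ arr, arr.count x = 3 := by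
  unfold is_three_and_one
  rw [PySem.Dict.foldl_insert_getD_add_one_eq_counter]
  rw [PySem.List.foldl_if_true_eq]
  simp only [PySem.Dict.values, PySem.Dict.items_counter, List.map_map, Bool.false_or,
    List.any_map, List.any_eq_true, Function.comp_def, beq_iff_eq]
  constructor
  · rintro ⟨x, hx, hc⟩
    have hmem : x ∈ arr := (PySem.Set.mem_ofList _ _).mp hx
    exact ⟨x, hmem, by exact_mod_cast hc⟩
  · rintro ⟨x, hx, hc⟩
    exact ⟨x, (PySem.Set.mem_ofList _ _).mpr hx, by exact_mod_cast hc⟩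

-- ===== VERDICT =====
theorem is_three_and_one_spec : Claim_equal_is_three_and_one := by
  intro arr _
  unfold Spec_is_three_and_one
  rw [Bool.eq_iff_iff, a_iff, alt_iff]
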